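-- pv_equiv track=rewrite | github.com/kuznetsovvj/education | algorithms/codeforces/1649a.py | solution
-- ===== SOURCE A (Python) =====
-- def solution(seq):
--     first, last = -1, -1
--     for idx, item in enumerate(seq):
--         if not item:
--             first = idx - 1
--             break
--     if first == -1:
--         return 0
--     for idx in range(len(seq)-1, -1, -1):
--         if not seq[idx]:
--             last = idx + 1
--             break
--     return last - first
-- ===== SOURCE B (Python) =====
-- def solution(seq):
--     zeros = [i for i, x in enumerate(seq) if not x]
--     if not zeros:
--         return 0
--     return zeros[-1] - zeros[0] + 2
-- ===== Notes on version B (the rewrite author's own statement) =====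
-- stated objective: simpler
-- what changed: Replaces A's two early-breaking directional scans (forward for the first zero, backward over indices for the last) with one index-collecting pass plus the endpoint formula zeros[-1]-zeros[0]+2.
-- intended difference: On lists whose first element is zero, A's first=idx-1 computes -1 and collides with its own 'no zero found' sentinel so A returns 0, while B returns the intended last_zero - first_zero + 2, the same formula A computes on every other input with a zero. — e.g. on solution([0]): A returns 0, B returns 2
import Mathlib
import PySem

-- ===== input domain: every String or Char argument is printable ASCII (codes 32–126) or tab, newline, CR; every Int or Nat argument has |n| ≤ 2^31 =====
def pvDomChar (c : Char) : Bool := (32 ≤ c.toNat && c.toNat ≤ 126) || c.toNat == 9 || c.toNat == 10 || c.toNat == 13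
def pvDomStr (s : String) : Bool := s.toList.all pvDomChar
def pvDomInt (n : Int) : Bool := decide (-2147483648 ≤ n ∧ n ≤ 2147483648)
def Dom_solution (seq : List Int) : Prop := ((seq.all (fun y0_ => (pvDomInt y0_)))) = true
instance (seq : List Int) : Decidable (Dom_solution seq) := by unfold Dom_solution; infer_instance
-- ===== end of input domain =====

-- B replaces A's two early-breaking directional scans with one zero-index-collecting
-- pass plus the endpoint formula zeros[-1] - zeros[0] + 2 (objective: simpler).

-- ===== PORT A =====
-- first loop: 'for idx, item in enumerate(seq): if not item: first = idx-1; break'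
def aFirstLoop : List Int → Int → Int
  | [], _ => -1
  | x :: xs, idx => if x = 0 then idx - 1 else aFirstLoop xs (idx + 1)

-- second loop: 'for idx in range(len(seq)-1, -1, -1): if not seq[idx]: last = idx+1; break'
-- (recursion on the index counting down; seq.getD i 1 is seq[i], always in range here)
def aLastLoop (seq : List Int) : Nat → Int
  | 0 => -1
  | i + 1 => if seq.getD i 1 = 0 then (i : Int) + 1 else aLastLoop seq i

def solution (seq : List Int) : Int :=
  let first := aFirstLoop seq 0
  if first = -1 then 0
  else aLastLoop seq seq.length - first

-- ===== PORT B =====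
-- zeros = [i for i, x in enumerate(seq) if not x]
def zerosIdx : List Int → Int → List Int
  | [], _ => []
  | x :: xs, k => if x = 0 then k :: zerosIdx xs (k + 1) else zerosIdx xs (k + 1)

def solution_alt (seq : List Int) : Int :=
  match zerosIdx seq 0 with
  | [] => 0
  | z :: rest => rest.getLastD z - z + 2   -- zeros[-1] - zeros[0] + 2

-- ===== PRECONDITION & SPEC =====
-- On lists whose first element is zero, A's first=idx-1 computes -1 and collides with its
-- own 'no zero found' sentinel so A returns 0, while B returns the intended
-- last_zero - first_zero + 2; B's value is the formula A computes on every other input.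
def D_solution (seq : List Int) : Prop := seq.head? = some 0
instance (seq : List Int) : Decidable (D_solution seq) := by unfold D_solution; infer_instance

def Spec_solution (seq : List Int) (out : Int) : Prop := ¬ D_solution seq → out = solution_alt seq
instance (seq : List Int) (out : Int) : Decidable (Spec_solution seq out) := by unfold Spec_solution; infer_instance

def pvDiffWitness_solution : List Int := [0]
def pvDiffWitnessOut_solution : Int × Int := (0, 2)

-- ===== CLAIM (what is proved, stated in full; the proofs are below) =====
def Claim_unchanged_solution : Prop := ∀ (seq : List Int), Dom_solution seq → Spec_solution seq (solution seq)
def Claim_changed_solution : Prop := Dom_solution (pvDiffWitness_solution) ∧ D_solution (pvDiffWitness_solution) ∧ solution (pvDiffWitness_solution) = pvDiffWitnessOut_solution.1 ∧ solution_alt (pvDiffWitness_solution) = pvDiffWitnessOut_solution.2 ∧ pvDiffWitnessOut_solution.1 ≠ pvDiffWitnessOut_solution.2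
def Claim_exact_solution : Prop := ∀ (seq : List Int), Dom_solution seq → D_solution seq → solution seq ≠ solution_alt seq

-- ===== LEMMAS AND PROOFS =====

-- every collected index is ≥ the starting counter
theorem mem_zerosIdx_ge (xs : List Int) (k z : Int) (h : z ∈ zerosIdx xs k) : k ≤ z := by
  induction xs generalizing k with
  | nil => simp [zerosIdx] at h
  | cons x xs ih =>
    simp only [zerosIdx] at h
    split at h
    · rcases List.mem_cons.mp h with h | h
      · omega
      · have := ih (k + 1) h; omega
    · have := ih (k + 1) h; omega

-- A's first loop finds the head of the zeros list, minus one
theorem aFirstLoop_eq (xs : List Int) (k : Int) :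
    aFirstLoop xs k = match zerosIdx xs k with | [] => -1 | z :: _ => z - 1 := by
  induction xs generalizing k with
  | nil => simp [aFirstLoop, zerosIdx]
  | cons x xs ih =>
    simp only [aFirstLoop, zerosIdx]
    split <;> simp [ih]

theorem zerosIdx_append_singleton (xs : List Int) (y k : Int) :
    zerosIdx (xs ++ [y]) k =
      zerosIdx xs k ++ (if y = 0 then [k + xs.length] else []) := by
  induction xs generalizing k with
  | nil =>
    simp only [List.nil_append, zerosIdx]
    split <;> simp
  | cons x xs ih =>
    simp only [List.cons_append, zerosIdx, ih]
    split <;> simp <;> ring_nf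

-- A's second loop: scanning indices m-1 .. 0 finds the last zero among the first m elements
theorem aLastLoop_eq (seq : List Int) (m : Nat) (hm : m ≤ seq.length) :
    aLastLoop seq m =
      match (zerosIdx (seq.take m) 0).getLast? with | none => -1 | some z => z + 1 := by
  induction m with
  | zero => simp [aLastLoop, zerosIdx]
  | succ i ih =>
    have hi : i < seq.length := by omega
    have htake : seq.take (i + 1) = seq.take i ++ [seq.getD i 1] := by
      rw [List.take_add_one]
      simp [List.getD, List.getElem?_eq_getElem hi]
    have hlen : ((seq.take i).length : Int) = (i : Int) := by
      simp [List.length_take, Nat.min_eq_left (le_of_lt hi)]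
    simp only [aLastLoop, htake, zerosIdx_append_singleton]
    by_cases hz : seq.getD i 1 = 0
    · rw [if_pos hz, if_pos hz, List.getLast?_concat]
      simp [hlen]
      omega
    · rw [if_neg hz, if_neg hz, List.append_nil]
      exact ih (le_of_lt hi)

-- the two endpoint extractions agree: (z::rest).getLastD-form vs getLast?
theorem getLastD_eq (z : Int) (rest : List Int) :
    rest.getLastD z = ((z :: rest).getLast?).getD 0 := by
  induction rest generalizing z with
  | nil => simp
  | cons a l ih =>
    rw [List.getLastD_cons, ih a, List.getLast?_cons_cons]

-- ===== VERDICT (by name: the statement is the Claim_ definition above) =====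
theorem solution_spec : Claim_unchanged_solution := by
  intro seq _ hD
  unfold solution solution_alt
  rw [aFirstLoop_eq]
  cases hZ : zerosIdx seq 0 with
  | nil => rfl
  | cons z rest =>
    have hz0 : z ≠ 0 := by
      intro h
      cases seq with
      | nil => simp [zerosIdx] at hZ
      | cons x xs =>
        apply hD
        simp only [D_solution, List.head?_cons, Option.some.injEq]
        by_contra hx
        simp only [zerosIdx, if_neg hx] at hZ
        have : z ∈ zerosIdx xs (0 + 1) := by rw [hZ]; exact List.mem_cons_self
        have := mem_zerosIdx_ge xs (0 + 1) z this
        omega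
    have hge : (0 : Int) ≤ z := mem_zerosIdx_ge seq 0 z (by rw [hZ]; exact List.mem_cons_self)
    rw [if_neg (show ¬((z - 1 : Int) = -1) by omega)]
    rw [aLastLoop_eq seq seq.length le_rfl, List.take_length, hZ]
    show (match (z :: rest).getLast? with | none => (-1 : Int) | some w => w + 1) - (z - 1)
        = rest.getLastD z - z + 2
    rw [getLastD_eq]
    cases hL : (z :: rest).getLast? with
    | none => simp at hL
    | some v =>
      show v + 1 - (z - 1) = (some v).getD 0 - z + 2
      simp
      omega

theorem solution_changed : Claim_changed_solution := by
  unfold Claim_changed_solution; decide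

theorem solution_tight : Claim_exact_solution := by
  intro seq _ hD
  cases seq with
  | nil => simp [D_solution] at hD
  | cons x xs =>
    have hx : x = 0 := by simpa [D_solution] using hD
    subst hx
    unfold solution solution_alt
    rw [aFirstLoop_eq]
    have hZ : zerosIdx (0 :: xs) 0 = 0 :: zerosIdx xs (0 + 1) := by simp [zerosIdx]
    rw [hZ]
    have hL : (0 : Int) ≤ (zerosIdx xs (0 + 1)).getLastD 0 := by
      rw [List.getLastD_eq_getLast?]
      cases h : (zerosIdx xs (0 + 1)).getLast? with
      | none => simp
      | some v =>
        have hv : v ∈ zerosIdx xs (0 + 1) := List.mem_of_getLast? h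
        have := mem_zerosIdx_ge xs (0 + 1) v hv
        simpa using by omega
    show (0 : Int) ≠ (zerosIdx xs (0 + 1)).getLastD 0 - 0 + 2
    omega
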